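-- pv_equiv track=rewrite | github.com/andreicroitorucpu/grupa6 | curs02/CNP.py | county_check
-- ===== SOURCE A (Python) =====
-- def county_check(cnp):
--     counties = ["%.2d" % i for i in range(1,47)]
--     counties.append('51')
--     counties.append('52')
--     inserted_county = cnp[6:8]
--     if inserted_county in counties:
--         return f"Valid: {inserted_county}"
--     else:
--         return f"Invalid: {inserted_county}"
-- ===== SOURCE B (Python) =====
-- def county_check(cnp):
--     s = cnp[6:8]
--     if len(s) == 2 and s.isascii() and s.isdigit() and (1 <= int(s) <= 46 or int(s) in (51, 52)):
--         return f"Valid: {s}"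
--     return f"Invalid: {s}"
-- ===== Notes on version B (the rewrite author's own statement) =====
-- stated objective: simpler
-- what changed: Replaces the 48-element string table and list membership with a direct numeric range test on the two-character slice (ASCII-digit guard plus 1<=v<=46 or v in (51,52)).
import Mathlib
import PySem

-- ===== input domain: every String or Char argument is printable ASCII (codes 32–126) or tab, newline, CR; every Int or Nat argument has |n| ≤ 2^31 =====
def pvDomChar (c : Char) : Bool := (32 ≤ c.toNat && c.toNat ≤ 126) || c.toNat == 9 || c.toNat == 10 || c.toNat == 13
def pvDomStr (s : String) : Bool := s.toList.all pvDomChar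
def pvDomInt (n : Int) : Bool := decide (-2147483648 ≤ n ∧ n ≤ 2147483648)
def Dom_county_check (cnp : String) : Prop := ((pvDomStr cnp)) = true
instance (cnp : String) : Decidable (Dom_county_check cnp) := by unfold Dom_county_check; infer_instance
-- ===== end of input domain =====

-- B replaces A's 48-element county string table and list membership by a direct
-- numeric range test on the two-character slice (objective: simpler).

-- ===== PORT A =====
-- "%.2d" % i : zero-pad str(i) to width 2 (exact for the i ≥ 0 used here) = zfill
def countyFmt (i : Int) : List Char := PySem.Chars.zfill (PySem.Int.toChars i) 2

def county_check (cnp : String) : String :=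
  -- counties = ["%.2d" % i for i in range(1,47)]; counties.append('51'); counties.append('52')
  let counties : List (List Char) :=
    ((PySem.List.pyRange 1 47 1).map countyFmt) ++ [['5','1']] ++ [['5','2']]
  let inserted := PySem.List.slice cnp.toList (some 6) (some 8)
  if counties.contains inserted then
    String.ofList ("Valid: ".toList ++ inserted)
  else
    String.ofList ("Invalid: ".toList ++ inserted)

-- ===== PORT B =====
-- the single compound condition of Source B, as one Bool
def altOk (s : List Char) : Bool :=
  s.length == 2 && s.all (fun c => c.toNat ≤ 127) && PySem.Chars.strIsdigit s &&
    (match PySem.Int.ofChars? s with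
     | some v => decide ((1 ≤ v ∧ v ≤ 46) ∨ v = 51 ∨ v = 52)
     | none => false)

def county_check_alt (cnp : String) : String :=
  let s := PySem.List.slice cnp.toList (some 6) (some 8)
  if altOk s then
    String.ofList ("Valid: ".toList ++ s)
  else
    String.ofList ("Invalid: ".toList ++ s)

-- ===== PRECONDITION & SPEC =====
def Spec_county_check (cnp : String) (out : String) : Prop := out = county_check_alt cnp
instance (cnp : String) (out : String) : Decidable (Spec_county_check cnp out) := by unfold Spec_county_check; infer_instance

-- ===== CLAIM (what is proved, stated in full; the proofs are below) =====
def Claim_equal_county_check : Prop := ∀ (cnp : String), Dom_county_check cnp → Spec_county_check cnp (county_check cnp)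

-- ===== LEMMAS AND PROOFS =====

-- A's decision, factored for the proof
def aCounties : List (List Char) :=
  ((PySem.List.pyRange 1 47 1).map countyFmt) ++ [['5','1']] ++ [['5','2']]

-- every table entry is a pair of ASCII digit characters
lemma aCounties_shape :
    aCounties.all (fun l => l.length == 2 &&
      l.all (fun c => 48 ≤ c.toNat && c.toNat ≤ 57)) = true := by decide

-- digit pairs: the two decisions agree (finite check over the 100 digit pairs)
lemma digit_pair_ok (a b : Fin 10) :
    aCounties.contains [Char.ofNat (48 + a.val), Char.ofNat (48 + b.val)] =
      altOk [Char.ofNat (48 + a.val), Char.ofNat (48 + b.val)] := by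
  revert a b
  decide

lemma isdigit_iff (c : Char) : PySem.Chars.isdigit c = true ↔ 48 ≤ c.toNat ∧ c.toNat ≤ 57 := by
  simp only [PySem.Chars.isdigit, Char.le_def, UInt32.le_iff_toNat_le, Bool.and_eq_true,
    decide_eq_true_eq, Char.toNat_val, show '0'.toNat = 48 from rfl, show '9'.toNat = 57 from rfl]

-- the key pointwise fact: on any ASCII slice the two decisions agree
lemma decisions_agree (s : List Char) (hascii : ∀ c ∈ s, c.toNat ≤ 127) :
    aCounties.contains s = altOk s := by
  by_cases h2 : s.length = 2
  · obtain ⟨c0, c1, rfl⟩ : ∃ c0 c1, s = [c0, c1] := by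
      match s, h2 with
      | [c0, c1], _ => exact ⟨c0, c1, rfl⟩
    by_cases hd : (48 ≤ c0.toNat ∧ c0.toNat ≤ 57) ∧ (48 ≤ c1.toNat ∧ c1.toNat ≤ 57)
    · have e0 : c0 = Char.ofNat (48 + (c0.toNat - 48)) := by
        rw [show 48 + (c0.toNat - 48) = c0.toNat by omega, Char.ofNat_toNat]
      have e1 : c1 = Char.ofNat (48 + (c1.toNat - 48)) := by
        rw [show 48 + (c1.toNat - 48) = c1.toNat by omega, Char.ofNat_toNat]
      rw [e0, e1]
      exact digit_pair_ok ⟨c0.toNat - 48, by omega⟩ ⟨c1.toNat - 48, by omega⟩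
    · -- one char is not a digit: both sides are false
      have hA : aCounties.contains [c0, c1] = false := by
        have hmem : [c0, c1] ∉ aCounties := by
          intro hm
          have := List.all_eq_true.1 aCounties_shape _ hm
          simp only [Bool.and_eq_true, List.all_eq_true, beq_iff_eq] at this
          have h0 := this.2 c0 (by simp)
          have h1 := this.2 c1 (by simp)
          simp only [decide_eq_true_eq] at h0 h1
          exact hd ⟨⟨h0.1, h0.2⟩, h1.1, h1.2⟩
        simpa using hmem
      have hB : altOk [c0, c1] = false := by
        by_cases h0 : PySem.Chars.isdigit c0 = true
        · by_cases h1 : PySem.Chars.isdigit c1 = true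
          · exact absurd ⟨(isdigit_iff c0).1 h0, (isdigit_iff c1).1 h1⟩ hd
          · simp [altOk, PySem.Chars.strIsdigit, h0, Bool.eq_false_iff.2 h1]
        · simp [altOk, PySem.Chars.strIsdigit, Bool.eq_false_iff.2 h0]
      rw [hA, hB]
  · -- slice not of length 2: membership fails (all entries have length 2), B's length guard fails
    have hA : aCounties.contains s = false := by
      have hmem : s ∉ aCounties := by
        intro hm
        have := List.all_eq_true.1 aCounties_shape _ hm
        simp only [Bool.and_eq_true, beq_iff_eq] at this
        exact h2 this.1
      simpa using hmem
    have hB : altOk s = false := by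
      simp [altOk, h2]
    rw [hA, hB]

-- ===== VERDICT (by name: the statement is the Claim_ definition above) =====
theorem county_check_spec : Claim_equal_county_check := by
  intro cnp hdom
  unfold Spec_county_check county_check county_check_alt
  have hascii : ∀ c ∈ PySem.List.slice cnp.toList (some 6) (some 8), c.toNat ≤ 127 := by
    intro c hc
    have hc' : c ∈ cnp.toList := PySem.List.mem_of_mem_slice cnp.toList _ _ hc
    have := List.all_eq_true.1 hdom c hc'
    simp only [pvDomChar, Bool.or_eq_true, Bool.and_eq_true, beq_iff_eq,
      decide_eq_true_eq] at this
    omega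
  have := decisions_agree (PySem.List.slice cnp.toList (some 6) (some 8)) hascii
  simp only [aCounties] at this
  simp only [this]
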